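-- pv_equiv track=rewrite | github.com/pypi-data/pypi-mirror-360 | packages/baml-agents/baml_agents-0.46.1.tar.gz/baml_agents-0.46.1/baml_agents/_project_utils/_init_logging.py | _group_per_package
-- ===== SOURCE A (Python) =====
-- from collections import defaultdict
--
-- def _group_per_package(per_package):
--     grouped_per_package = {}
--     if per_package:
--         grouped = defaultdict(list)
--         for package, value in per_package.items():
--             grouped[value].append(package)
--         # Sort the module lists for each value
--         grouped_per_package = {
--             value: sorted(modules, reverse=True)
--             for value, modules in sorted(
--                 grouped.items(), key=lambda item: item[0], reverse=True
--             )
--         }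
--     return grouped_per_package
-- ===== SOURCE B (Python) =====
-- def _group_per_package(per_package):
--     if not per_package:
--         return {}
--     items = list(per_package.items())
--     values = sorted({v for _, v in items}, reverse=True)
--     return {
--         v: sorted((p for p, val in items if val == v), reverse=True)
--         for v in values
--     }
-- ===== Notes on version B (the rewrite author's own statement) =====
-- stated objective: simpler
-- what changed: B drops the defaultdict grouping pass entirely: it sorts the distinct values once and builds each group by filtering the items per value, instead of accumulating a dict of lists and then sorting every group and the dict's items.
import Mathlib
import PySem

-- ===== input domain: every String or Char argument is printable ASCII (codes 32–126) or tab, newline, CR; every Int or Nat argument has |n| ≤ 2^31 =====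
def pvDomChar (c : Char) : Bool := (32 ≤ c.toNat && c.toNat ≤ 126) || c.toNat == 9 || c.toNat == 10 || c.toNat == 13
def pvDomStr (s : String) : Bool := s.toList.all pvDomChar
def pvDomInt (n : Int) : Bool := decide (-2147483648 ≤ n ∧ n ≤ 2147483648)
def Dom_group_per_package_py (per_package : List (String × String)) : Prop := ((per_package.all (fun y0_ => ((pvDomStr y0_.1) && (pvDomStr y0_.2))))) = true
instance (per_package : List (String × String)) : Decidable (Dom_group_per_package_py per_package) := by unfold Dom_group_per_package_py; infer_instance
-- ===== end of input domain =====

-- One honest line: B replaces A's defaultdict-grouping-then-sort-each-group with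
-- "sort the distinct values descending, then filter the items once per value" — simpler, same results.
-- Both ports model the dict parameter as PySem.Dict.ofList of the association list (Python dict(pairs) semantics).

-- ===== PORT A =====
def group_per_package_py (per_package : List (String × String)) : List (String × List String) :=
  -- grouped_per_package = {}
  if per_package = [] then [] else
  -- for package, value in per_package.items(): grouped[value].append(package)
  let items := (PySem.Dict.ofList per_package).items
  let grouped : PySem.Dict String (List String) :=
    items.foldl (fun d q => d.modify q.2 [] (· ++ [q.1])) PySem.Dict.empty
  -- {value: sorted(modules, reverse=True) for value, modules in sorted(grouped.items(), key=..item[0], reverse=True)}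
  (PySem.List.sorted grouped.items (fun it => it.1) true).map
    (fun it => (it.1, PySem.List.sorted it.2 (fun m => m) true))

-- ===== PORT B =====
def group_per_package_py_alt (per_package : List (String × String)) : List (String × List String) :=
  if per_package = [] then [] else
  let items := (PySem.Dict.ofList per_package).items
  -- values = sorted({v for _, v in items}, reverse=True)
  let values := PySem.List.sorted (PySem.Set.ofList (items.map (fun q => q.2))) (fun v => v) true
  -- {v: sorted((p for p, val in items if val == v), reverse=True) for v in values}
  values.map (fun v =>
    (v, PySem.List.sorted ((items.filter (fun q => q.2 == v)).map (fun q => q.1)) (fun p => p) true))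

-- ===== PRECONDITION & SPEC =====
def Spec_group_per_package_py (per_package : List (String × String)) (out : List (String × List String)) : Prop := out = group_per_package_py_alt per_package
instance (per_package : List (String × String)) (out : List (String × List String)) : Decidable (Spec_group_per_package_py per_package out) := by unfold Spec_group_per_package_py; infer_instance

-- ===== CLAIM (what is proved, stated in full; the proofs are below) =====
def Claim_equal_group_per_package_py : Prop := ∀ (per_package : List (String × String)), Dom_group_per_package_py per_package → Spec_group_per_package_py per_package (group_per_package_py per_package)

-- ===== LEMMAS AND PROOFS =====


theorem pvKeys (l : List (String × String)) :
    (l.foldl (fun d q => d.modify q.2 [] (fun old => old ++ [q.1])) (PySem.Dict.empty : PySem.Dict String (List String))).keys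
      = PySem.Set.ofList (l.map (fun q => q.2)) := by
  have h := PySem.Dict.keys_foldl_modify_key l (fun q => q.2) [] (fun _ q old => old ++ [q.1]) (PySem.Dict.empty : PySem.Dict String (List String))
  rw [h]
  simp [PySem.Set.update, PySem.Set.ofList_eq_foldl]

theorem pvNodup (l : List (String × String)) :
    (l.foldl (fun d q => d.modify q.2 [] (fun old => old ++ [q.1])) (PySem.Dict.empty : PySem.Dict String (List String))).keys.Nodup := by
  exact PySem.Dict.nodup_keys_foldl_modify_key l (fun q => q.2) [] (fun _ q old => old ++ [q.1]) _ (by simp [PySem.Dict.empty])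

theorem pvGetD (l : List (String × String)) (c : String) :
    (l.foldl (fun d q => d.modify q.2 [] (fun old => old ++ [q.1])) (PySem.Dict.empty : PySem.Dict String (List String))).getD c []
      = (l.filter (fun q => q.2 == c)).map (fun q => q.1) := by
  have hm : (l.foldl (fun d q => d.modify q.2 [] (fun old => old ++ [q.1])) (PySem.Dict.empty : PySem.Dict String (List String)))
      = ((l.map Prod.swap).foldl (fun d p => d.modify p.1 [] (fun old => old ++ [p.2])) PySem.Dict.empty) := by
    rw [List.foldl_map]; rfl
  rw [hm, PySem.Dict.getD_foldl_modify_append]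
  simp [List.filter_map, Function.comp_def]

theorem pvSortedMap (S : List String) (hS : S.Nodup) (g : String → List String) :
    PySem.List.sorted (S.map (fun k => (k, g k))) (fun it => it.1) true
      = (PySem.List.sorted S (fun v => v) true).map (fun k => (k, g k)) := by
  apply PySem.List.sorted_rev_eq_of_perm_of_pairwise_gt
  · exact (PySem.List.sorted_perm S (fun v => v) true).map _
  · rw [List.pairwise_map]
    have h1 := PySem.List.sorted_pairwise_rev S (fun v => v)
    have h2 : (PySem.List.sorted S (fun v => v) true).Nodup :=
      ((PySem.List.sorted_perm S (fun v => v) true).nodup_iff).mpr hS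
    exact (h1.and h2).imp (fun hab => lt_of_le_of_ne hab.1 (fun he => hab.2 he.symm))

theorem pvMain (pp : List (String × String)) : group_per_package_py pp = group_per_package_py_alt pp := by
  by_cases h : pp = []
  · simp [group_per_package_py, group_per_package_py_alt, h]
  · simp only [group_per_package_py, group_per_package_py_alt, if_neg h]
    set xs := (PySem.Dict.ofList pp).items with hxs
    rw [PySem.Dict.items_eq_map_keys _ (pvNodup xs) []]
    rw [pvSortedMap _ (by rw [pvKeys]; exact PySem.Set.nodup_ofList _)]
    rw [List.map_map, pvKeys]
    apply List.map_congr_left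
    intro v hv
    simp [Function.comp, pvGetD]

-- ===== VERDICT (by name: the statement is the Claim_ definition above) =====
theorem group_per_package_py_spec : Claim_equal_group_per_package_py := by
  intro pp _
  unfold Spec_group_per_package_py
  exact pvMain pp
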